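-- pv_equiv track=rewrite | github.com/shiv-santosh/glowing-tribble | johnson_trotter.py | get_largest_movable
-- ===== SOURCE A (Python) =====
-- def get_largest_movable(f):
--     largest_movable = -1
--     for i in range(len(f)):
--         v = f[i][0]
--         d = f[i][1]
--         if d:
--             if i - 1 < 0:
--                 continue
--             else:
--                 if f[i-1][0] < v and (largest_movable == -1 or f[largest_movable][0] < v):
--                     largest_movable = i
--         else:
--             if i + 1 >= len(f):
--                 continue
--             else:
--                 if f[i + 1][0] < v and (largest_movable == -1 or f[largest_movable][0] < v):
--                     largest_movable = i
--
--     return largest_movable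
-- ===== SOURCE B (Python) =====
-- def get_largest_movable(f):
--     n = len(f)
--     # indices ordered by value descending, index ascending on ties (stable sort)
--     order = sorted(range(n), key=lambda i: (-f[i][0], i))
--     for i in order:
--         j = i - 1 if f[i][1] else i + 1
--         if 0 <= j < n and f[j][0] < f[i][0]:
--             return i
--     return -1
-- ===== Notes on version B (the rewrite author's own statement) =====
-- stated objective: alternative
-- what changed: A's single pass with a running strict-greater argmax is replaced by a sort-then-scan algorithm: B sorts the indices by the key (-value, index) and returns the first index in that order whose direction neighbour exists and is smaller, -1 if none.
import Mathlib
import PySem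

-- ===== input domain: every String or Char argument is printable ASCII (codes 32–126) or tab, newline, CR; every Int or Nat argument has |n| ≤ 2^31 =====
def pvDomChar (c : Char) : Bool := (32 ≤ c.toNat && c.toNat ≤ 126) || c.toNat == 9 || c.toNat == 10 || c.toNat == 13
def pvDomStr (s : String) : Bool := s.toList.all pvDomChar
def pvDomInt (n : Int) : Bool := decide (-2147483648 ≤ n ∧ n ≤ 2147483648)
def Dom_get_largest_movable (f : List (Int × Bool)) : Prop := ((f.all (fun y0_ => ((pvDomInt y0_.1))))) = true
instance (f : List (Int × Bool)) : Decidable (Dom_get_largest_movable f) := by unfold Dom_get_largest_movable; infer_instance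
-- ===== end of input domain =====

-- B replaces A's single running-argmax scan by a different algorithm: sort the indices by (value desc, index asc) and return the first movable one (objective: alternative, O(n^2) insertion-sort port vs A's O(n) scan in Lean; Python B is O(n log n)).


-- ===== PORT A =====
-- loop body of A, named so the proofs can talk about it; the f[largest_movable]
-- read is guarded by 'largest_movable == -1 or', so pyGetD's default is never seen.
def gmStepA (f : List (Int × Bool)) (largest_movable i : Int) : Int :=
  let v := (PySem.List.pyGetD f i (0, false)).1
  let d := (PySem.List.pyGetD f i (0, false)).2
  if d then
    if i - 1 < 0 then largest_movable
    else
      if (PySem.List.pyGetD f (i - 1) (0, false)).1 < v ∧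
          (largest_movable = -1 ∨ (PySem.List.pyGetD f largest_movable (0, false)).1 < v) then i
      else largest_movable
  else
    if i + 1 ≥ PySem.List.len f then largest_movable
    else
      if (PySem.List.pyGetD f (i + 1) (0, false)).1 < v ∧
          (largest_movable = -1 ∨ (PySem.List.pyGetD f largest_movable (0, false)).1 < v) then i
      else largest_movable

def get_largest_movable (f : List (Int × Bool)) : Int :=
  (PySem.List.pyRange 0 (PySem.List.len f) 1).foldl (gmStepA f) (-1)

-- ===== PORT B =====
-- f[i][0] (every index B reads is in range)
def gmKey (f : List (Int × Bool)) (i : Int) : Int := (PySem.List.pyGetD f i (0, false)).1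

-- B's loop test: '0 <= j < n and f[j][0] < f[i][0]' with j the direction neighbour
def gmMovable (f : List (Int × Bool)) (i : Int) : Bool :=
  let j : Int := if (PySem.List.pyGetD f i (0, false)).2 then i - 1 else i + 1
  decide (0 ≤ j) && decide (j < PySem.List.len f) && decide (gmKey f j < gmKey f i)

-- B: sorted(range(n), key=lambda i: (-f[i][0], i)), then first movable index, else -1
def get_largest_movable_alt (f : List (Int × Bool)) : Int :=
  let n := PySem.List.len f
  let order := PySem.List.sorted2 (PySem.List.pyRange 0 n 1) (fun i => -(gmKey f i)) (fun i => i) false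
  (order.find? (gmMovable f)).getD (-1)

-- ===== PRECONDITION & SPEC =====
def Spec_get_largest_movable (f : List (Int × Bool)) (out : Int) : Prop := out = get_largest_movable_alt f
instance (f : List (Int × Bool)) (out : Int) : Decidable (Spec_get_largest_movable f out) := by unfold Spec_get_largest_movable; infer_instance

-- ===== CLAIM (what is proved, stated in full; the proofs are below) =====
def Claim_equal_get_largest_movable : Prop := ∀ (f : List (Int × Bool)), Dom_get_largest_movable f → Spec_get_largest_movable f (get_largest_movable f)

-- ===== LEMMAS AND PROOFS =====

-- the comparison sorted2 uses for B's key (value descending, index ascending)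
def gmBefore (f : List (Int × Bool)) (a b : Int) : Bool :=
  decide (-(gmKey f a) < -(gmKey f b)) || (!decide (-(gmKey f b) < -(gmKey f a)) && decide (a < b))

theorem gmBefore_total (f : List (Int × Bool)) (a b : Int) (h : a ≠ b) :
    gmBefore f a b = true ∨ gmBefore f b a = true := by
  simp [gmBefore]; omega

theorem gmBefore_trans (f : List (Int × Bool)) (a b c : Int)
    (h1 : gmBefore f a b = true) (h2 : gmBefore f b c = true) : gmBefore f a c = true := by
  simp [gmBefore] at *; omega

theorem gmBefore_asymm (f : List (Int × Bool)) (a b : Int)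
    (h1 : gmBefore f a b = true) (h2 : gmBefore f b a = true) : False := by
  simp [gmBefore] at *; omega

-- sorted2 with B's keys is exactly the insertBy fold with gmBefore
theorem sorted2_eq_foldl (f : List (Int × Bool)) (xs : List Int) :
    PySem.List.sorted2 xs (fun i => -(gmKey f i)) (fun i => i) false
      = xs.foldl (fun acc x => PySem.List.insertBy (gmBefore f) x acc) [] := rfl

theorem insertBy_pairwise (f : List (Int × Bool)) (x : Int) (l : List Int)
    (hp : l.Pairwise (fun a b => gmBefore f a b = true)) (hx : ∀ y ∈ l, y ≠ x) :
    (PySem.List.insertBy (gmBefore f) x l).Pairwise (fun a b => gmBefore f a b = true) := by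
  induction l with
  | nil => simp [PySem.List.insertBy]
  | cons y ys ih =>
    rw [List.pairwise_cons] at hp
    obtain ⟨hy, hys⟩ := hp
    by_cases hb : gmBefore f x y = true
    · rw [show PySem.List.insertBy (gmBefore f) x (y :: ys) = x :: y :: ys by
        simp [PySem.List.insertBy, hb]]
      refine List.pairwise_cons.mpr ⟨?_, List.pairwise_cons.mpr ⟨hy, hys⟩⟩
      intro z hz
      rcases List.mem_cons.mp hz with rfl | hz'
      · exact hb
      · exact gmBefore_trans f x y z hb (hy z hz')
    · rw [show PySem.List.insertBy (gmBefore f) x (y :: ys)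
          = y :: PySem.List.insertBy (gmBefore f) x ys by
        simp [PySem.List.insertBy, hb]]
      refine List.pairwise_cons.mpr ⟨?_, ih hys (fun z hz => hx z (List.mem_cons_of_mem _ hz))⟩
      intro z hz
      rcases (PySem.List.mem_insertBy (gmBefore f) x z ys).mp hz with hzx | hz'
      · subst hzx
        rcases gmBefore_total f z y (fun he => hx y List.mem_cons_self he.symm) with h | h
        · exact absurd h hb
        · exact h
      · exact hy z hz'

-- the fold of insertBy over a duplicate-free list is pairwise-ordered by gmBefore
theorem foldl_insertBy_pairwise (f : List (Int × Bool)) (xs : List Int) (acc : List Int)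
    (hnd : xs.Nodup) (hacc : acc.Pairwise (fun a b => gmBefore f a b = true))
    (hdisj : ∀ x ∈ xs, x ∉ acc) :
    (xs.foldl (fun acc x => PySem.List.insertBy (gmBefore f) x acc) acc).Pairwise
      (fun a b => gmBefore f a b = true) := by
  induction xs generalizing acc with
  | nil => simpa using hacc
  | cons x xs ih =>
    rw [List.nodup_cons] at hnd
    simp only [List.foldl_cons]
    refine ih _ hnd.2 ?_ ?_
    · exact insertBy_pairwise f x acc hacc
        (fun y hy h => hdisj x List.mem_cons_self (h ▸ hy))
    · intro z hz hmem
      rcases (PySem.List.mem_insertBy (gmBefore f) x z acc).mp hmem with rfl | h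
      · exact hnd.1 hz
      · exact hdisj z (List.mem_cons_of_mem _ hz) h

-- the characterisation both programs satisfy: r = -1 and nothing in range n is movable,
-- or r is the movable index in range n that beats (gmBefore) every other movable one
def gmSel (f : List (Int × Bool)) (n r : Int) : Prop :=
  (r = -1 ∧ ∀ i ∈ PySem.List.pyRange 0 n 1, ¬ gmMovable f i = true) ∨
  (r ∈ PySem.List.pyRange 0 n 1 ∧ gmMovable f r = true ∧
    ∀ i ∈ PySem.List.pyRange 0 n 1, gmMovable f i = true → i ≠ r → gmBefore f r i = true)

theorem gmSel_unique (f : List (Int × Bool)) (n r1 r2 : Int)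
    (h1 : gmSel f n r1) (h2 : gmSel f n r2) : r1 = r2 := by
  rcases h1 with ⟨e1, hn1⟩ | ⟨m1, mov1, b1⟩
  · rcases h2 with ⟨e2, _⟩ | ⟨m2, mov2, _⟩
    · rw [e1, e2]
    · exact absurd mov2 (hn1 _ m2)
  · rcases h2 with ⟨_, hn2⟩ | ⟨m2, mov2, b2⟩
    · exact absurd mov1 (hn2 _ m1)
    · by_contra hne
      exact gmBefore_asymm f r1 r2 (b1 _ m2 mov2 (Ne.symm hne)) (b2 _ m1 mov1 hne)

-- a non-movable index leaves A's accumulator unchanged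
theorem gmStepA_not_movable (f : List (Int × Bool)) (m i : Int)
    (hi0 : 0 ≤ i) (hin : i < PySem.List.len f)
    (h : gmMovable f i = false) : gmStepA f m i = m := by
  unfold gmMovable at h
  unfold gmStepA
  cases hd : (PySem.List.pyGetD f i (0, false)).2 with
  | true =>
    rw [hd] at h
    simp only [Bool.and_eq_false_iff, decide_eq_false_iff_not, not_lt, not_le, if_true] at h
    simp only [if_true]
    rcases h with (h | h) | h
    · simp [show i - 1 < 0 by omega]
    · omega
    · by_cases hb : i - 1 < 0
      · simp [hb]
      · simp only [hb, if_false]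
        rw [if_neg]
        intro hc
        exact absurd hc.1 (by simpa [gmKey] using h)
  | false =>
    rw [hd] at h
    simp only [Bool.false_eq_true, if_false, Bool.and_eq_false_iff,
      decide_eq_false_iff_not, not_lt, not_le] at h
    simp only [Bool.false_eq_true, if_false]
    rcases h with (h | h) | h
    · omega
    · rw [if_pos h]
    · by_cases hb : i + 1 ≥ PySem.List.len f
      · rw [if_pos hb]
      · simp only [show ¬ i + 1 ≥ PySem.List.len f from hb, if_false]
        rw [if_neg]
        intro hc
        exact absurd hc.1 (by simpa [gmKey] using h)

-- on a movable index A's update is exactly the strict-greater (first-max) rule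
theorem gmStepA_movable (f : List (Int × Bool)) (m i : Int)
    (h : gmMovable f i = true) :
    gmStepA f m i = if m = -1 ∨ gmKey f m < gmKey f i then i else m := by
  unfold gmMovable at h
  unfold gmStepA
  cases hd : (PySem.List.pyGetD f i (0, false)).2 with
  | true =>
    rw [hd] at h
    simp only [if_true, Bool.and_eq_true, decide_eq_true_eq] at h
    simp only [if_true]
    obtain ⟨⟨h0, _⟩, hlt⟩ := h
    rw [if_neg (by omega : ¬ i - 1 < 0)]
    by_cases hm : m = -1 ∨ (PySem.List.pyGetD f m (0, false)).1 < (PySem.List.pyGetD f i (0, false)).1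
    · rw [if_pos ⟨by simpa [gmKey] using hlt, hm⟩, if_pos (by simpa [gmKey] using hm)]
    · rw [if_neg (fun hc => hm hc.2), if_neg (by simpa [gmKey] using hm)]
  | false =>
    rw [hd] at h
    simp only [Bool.false_eq_true, if_false, Bool.and_eq_true, decide_eq_true_eq] at h
    simp only [Bool.false_eq_true, if_false]
    obtain ⟨⟨_, h1⟩, hlt⟩ := h
    rw [if_neg (by omega : ¬ i + 1 ≥ PySem.List.len f)]
    by_cases hm : m = -1 ∨ (PySem.List.pyGetD f m (0, false)).1 < (PySem.List.pyGetD f i (0, false)).1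
    · rw [if_pos ⟨by simpa [gmKey] using hlt, hm⟩, if_pos (by simpa [gmKey] using hm)]
    · rw [if_neg (fun hc => hm hc.2), if_neg (by simpa [gmKey] using hm)]

-- A's loop satisfies the characterisation
theorem gmA_sel (f : List (Int × Bool)) : ∀ k : Nat, k ≤ f.length →
    gmSel f k ((PySem.List.pyRange 0 k 1).foldl (gmStepA f) (-1)) := by
  intro k
  induction k with
  | zero =>
    intro _
    simp [PySem.List.pyRange_one_eq_nil (by norm_num : (0:Int) ≥ 0), gmSel]
  | succ k ih =>
    intro hk
    have hk' : (k : Nat) ≤ f.length := Nat.le_of_succ_le hk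
    have hsel := ih hk'
    have hcast : ((k + 1 : Nat) : Int) = (k : Int) + 1 := by push_cast; ring
    rw [hcast, PySem.List.pyRange_one_succ_right (by positivity : (0:Int) ≤ (k:Int)),
      List.foldl_append, List.foldl_cons, List.foldl_nil]
    set m := (PySem.List.pyRange 0 (k:Int) 1).foldl (gmStepA f) (-1) with hm
    have hklen : (k : Int) < PySem.List.len f := by
      simp [PySem.List.len_eq]; exact_mod_cast hk
    by_cases hmov : gmMovable f k = true
    · rw [gmStepA_movable f _ _ hmov]
      by_cases hup : m = -1 ∨ gmKey f m < gmKey f k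
      · rw [if_pos hup]
        refine Or.inr ⟨?_, hmov, ?_⟩
        · rw [PySem.List.mem_pyRange_one]; omega
        · intro i hi hmovi hne
          rw [PySem.List.mem_pyRange_one] at hi
          have hik : (i : Int) < k := by
            rcases lt_or_eq_of_le (by omega : i ≤ (k:Int)) with h | h
            · exact h
            · exact absurd h hne
          rcases hsel with ⟨_, hnone⟩ | ⟨hmem, hmovm, hball⟩
          · exact absurd hmovi (hnone i (by rw [PySem.List.mem_pyRange_one]; omega))
          · -- m is movable, so hup's first disjunct cannot hold; key m < key k
            rw [PySem.List.mem_pyRange_one] at hmem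
            have hmk : gmKey f m < gmKey f k := by
              rcases hup with h | h
              · omega
              · exact h
            by_cases him : i = m
            · subst him; simp [gmBefore]; omega
            · have := hball i (by rw [PySem.List.mem_pyRange_one]; omega) hmovi him
              simp only [gmBefore, Bool.or_eq_true, Bool.and_eq_true, Bool.not_eq_eq_eq_not,
                Bool.not_true, decide_eq_true_eq, decide_eq_false_iff_not] at this ⊢
              omega
      · rw [if_neg hup]
        push Not at hup
        obtain ⟨hm1, hmk⟩ := hup
        rcases hsel with ⟨he, _⟩ | ⟨hmem, hmovm, hball⟩
        · exact absurd he hm1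
        · rw [PySem.List.mem_pyRange_one] at hmem
          refine Or.inr ⟨by rw [PySem.List.mem_pyRange_one]; omega, hmovm, ?_⟩
          intro i hi hmovi hne
          rw [PySem.List.mem_pyRange_one] at hi
          by_cases hik : (i : Int) = k
          · subst hik
            simp only [gmBefore, Bool.or_eq_true, Bool.and_eq_true, Bool.not_eq_eq_eq_not,
              Bool.not_true, decide_eq_true_eq, decide_eq_false_iff_not]
            omega
          · exact hball i (by rw [PySem.List.mem_pyRange_one]; omega) hmovi hne
    · rw [gmStepA_not_movable f _ _ (by positivity) hklen (by simpa using hmov)]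
      have hext : ∀ i : Int, i ∈ PySem.List.pyRange 0 ((k:Int)+1) 1 → gmMovable f i = true →
          i ∈ PySem.List.pyRange 0 (k:Int) 1 := by
        intro i hi hmovi
        rw [PySem.List.mem_pyRange_one] at hi ⊢
        rcases lt_or_eq_of_le (by omega : i ≤ (k:Int)) with h | h
        · omega
        · exact absurd hmovi (h ▸ hmov)
      rcases hsel with ⟨he, hnone⟩ | ⟨hmem, hmovm, hball⟩
      · exact Or.inl ⟨he, fun i hi hmovi => hnone i (hext i hi hmovi) hmovi⟩
      · refine Or.inr ⟨?_, hmovm, fun i hi hmovi hne => hball i (hext i hi hmovi) hmovi hne⟩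
        rw [PySem.List.mem_pyRange_one] at hmem ⊢
        omega

-- on a gmBefore-ordered list, the first hit of find? beats every later hit
theorem find?_pairwise_sel (f : List (Int × Bool)) (l : List Int) (r : Int)
    (hp : l.Pairwise (fun a b => gmBefore f a b = true))
    (hf : l.find? (gmMovable f) = some r) :
    ∀ j ∈ l, gmMovable f j = true → j ≠ r → gmBefore f r j = true := by
  induction l with
  | nil => simp at hf
  | cons h t ih =>
    rw [List.pairwise_cons] at hp
    obtain ⟨hh, ht⟩ := hp
    by_cases hmh : gmMovable f h = true
    · rw [show (h :: t).find? (gmMovable f) = some h by simp [hmh],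
        Option.some_inj] at hf
      subst hf
      intro j hj hmj hne
      rcases List.mem_cons.mp hj with rfl | hj'
      · exact absurd rfl hne
      · exact hh j hj'
    · rw [show (h :: t).find? (gmMovable f) = t.find? (gmMovable f) by
        simp [hmh]] at hf
      intro j hj hmj hne
      rcases List.mem_cons.mp hj with rfl | hj'
      · exact absurd hmj hmh
      · exact ih ht hf j hj' hmj hne

-- B's first movable in the sorted order satisfies the characterisation
theorem gmB_sel (f : List (Int × Bool)) :
    gmSel f (PySem.List.len f) (get_largest_movable_alt f) := by
  set n := PySem.List.len f with hn
  set order := PySem.List.sorted2 (PySem.List.pyRange 0 n 1) (fun i => -(gmKey f i)) (fun i => i) false with horder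
  have hperm : order.Perm (PySem.List.pyRange 0 n 1) := PySem.List.sorted2_perm _ _ _ _
  have hpair : order.Pairwise (fun a b => gmBefore f a b = true) := by
    rw [horder, sorted2_eq_foldl]
    exact foldl_insertBy_pairwise f _ [] (PySem.List.nodup_pyRange_one _ _)
      (List.Pairwise.nil) (by simp)
  have hgoal : get_largest_movable_alt f = (order.find? (gmMovable f)).getD (-1) := rfl
  rw [hgoal]
  cases hf : order.find? (gmMovable f) with
  | none =>
    rw [List.find?_eq_none] at hf
    refine Or.inl ⟨rfl, fun i hi hmov => hf i (hperm.mem_iff.mpr hi) hmov⟩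
  | some r =>
    simp only [Option.getD_some]
    refine Or.inr ⟨?_, ?_, ?_⟩
    · exact hperm.mem_iff.mp (List.mem_of_find?_eq_some hf)
    · exact List.find?_some hf
    · intro i hi hmovi hne
      exact find?_pairwise_sel f order r hpair hf i (hperm.mem_iff.mpr hi) hmovi hne

-- ===== VERDICT (by name: the statement is the Claim_ definition above) =====
theorem get_largest_movable_spec : Claim_equal_get_largest_movable := by
  intro f _
  unfold Spec_get_largest_movable get_largest_movable
  have hA := gmA_sel f f.length (le_refl _)
  have hB := gmB_sel f
  have hlen : PySem.List.len f = (f.length : Int) := by simp [PySem.List.len_eq]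
  rw [hlen] at hB
  exact gmSel_unique f f.length _ _ hA hB
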